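-- pv_equiv track=rewrite | github.com/PolinaVaganova/protein-loop-reconstruction | utils/run_modeller/model.py | get_gap_indexes
-- ===== SOURCE A (Python) =====
-- def get_gap_indexes(seq: str) -> list[int]:
--     start_sense_part = False
--     start_gap = False
--     gap_indexes = []
--     for idx, chr in enumerate(seq):
--         if chr != '-' and not start_sense_part:
--             start_sense_part = True
--         if chr == '-' and start_sense_part:
--             gap_indexes.append(idx + 1)
--             start_gap = True
--             start_sense_part = False
--         if chr != '-' and start_gap:
--             gap_indexes.append(idx)
--             break
--     return gap_indexes
-- ===== SOURCE B (Python) =====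
-- def get_gap_indexes(seq: str) -> list[int]:
--     n = len(seq)
--     i = 0
--     while i < n and seq[i] == '-':      # skip leading gap (no sense part yet)
--         i += 1
--     while i < n and seq[i] != '-':      # skip the sense part
--         i += 1
--     if i == n:
--         return []
--     res = [i + 1]                       # gap start (1-based, as in A)
--     while i < n and seq[i] == '-':      # skip the gap itself
--         i += 1
--     if i < n:
--         res.append(i)                   # gap end (first residue after gap)
--     return res
-- ===== Notes on version B (the rewrite author's own statement) =====
-- stated objective: simpler
-- what changed: Replaces the boolean-flag state machine with a three-stage linear scan (skip leading gaps, skip the sense part, then skip the gap) that reads off the two indices directly.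
import Mathlib
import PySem

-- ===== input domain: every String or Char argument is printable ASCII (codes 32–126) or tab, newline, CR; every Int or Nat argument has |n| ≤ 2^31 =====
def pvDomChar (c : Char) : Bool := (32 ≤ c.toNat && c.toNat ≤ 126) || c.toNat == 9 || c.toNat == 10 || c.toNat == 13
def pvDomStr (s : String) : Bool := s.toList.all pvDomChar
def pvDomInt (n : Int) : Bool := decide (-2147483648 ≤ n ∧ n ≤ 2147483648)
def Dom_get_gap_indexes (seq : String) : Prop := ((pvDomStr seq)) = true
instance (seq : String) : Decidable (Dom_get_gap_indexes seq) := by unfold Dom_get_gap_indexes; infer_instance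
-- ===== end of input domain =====

-- B replaces A's boolean-flag state machine with a three-stage scan; same result, same cost (objective: simpler).

-- ===== PORT A =====
-- A's for-loop over enumerate(seq) with flags start_sense_part/start_gap and early break.
def goA : List Char → Nat → Bool → Bool → List Int → List Int
  | [], _, _, _, acc => acc
  | c :: rest, idx, sense, gap, acc =>
    let sense1 := if c != '-' && !sense then true else sense
    let (acc1, gap1, sense2) :=
      if c == '-' && sense1 then (acc ++ [(idx : Int) + 1], true, false)
      else (acc, gap, sense1)
    if c != '-' && gap1 then acc1 ++ [(idx : Int)]   -- append idx, then break
    else goA rest (idx + 1) sense2 gap1 acc1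

def get_gap_indexes (seq : String) : List Int :=
  goA seq.toList 0 false false []

-- ===== PORT B =====
-- while i < n and p(seq[i]): i += 1   — returns the stop index and the remaining suffix
def skipWhileB (p : Char → Bool) : List Char → Nat → Nat × List Char
  | [], i => (i, [])
  | c :: rest, i => if p c then skipWhileB p rest (i + 1) else (i, c :: rest)

def get_gap_indexes_alt (seq : String) : List Int :=
  let l := seq.toList
  let (i1, r1) := skipWhileB (· == '-') l 0          -- skip leading gap
  let (i2, r2) := skipWhileB (· != '-') r1 i1        -- skip sense part
  match r2 with
  | [] => []
  | _ :: rest =>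
    let (i3, r3) := skipWhileB (· == '-') rest (i2 + 1)  -- skip the gap
    match r3 with
    | [] => [(i2 : Int) + 1]
    | _ => [(i2 : Int) + 1, (i3 : Int)]

-- ===== PRECONDITION & SPEC =====
def Spec_get_gap_indexes (seq : String) (out : List Int) : Prop := out = get_gap_indexes_alt seq
instance (seq : String) (out : List Int) : Decidable (Spec_get_gap_indexes seq out) := by unfold Spec_get_gap_indexes; infer_instance

-- ===== CLAIM (what is proved, stated in full; the proofs are below) =====
def Claim_equal_get_gap_indexes : Prop := ∀ (seq : String), Dom_get_gap_indexes seq → Spec_get_gap_indexes seq (get_gap_indexes seq)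

-- ===== LEMMAS AND PROOFS =====

-- Phase 3 of A (start_gap set): skip dashes, append the stop index unless the string ends.
lemma phase3 (l : List Char) : ∀ (i : Nat) (acc : List Int),
    goA l i false true acc =
      (match skipWhileB (· == '-') l i with
       | (_, []) => acc
       | (j, _ :: _) => acc ++ [(j : Int)]) := by
  induction l with
  | nil => intro i acc; simp [goA, skipWhileB]
  | cons c rest ih =>
    intro i acc
    by_cases hc : c = '-'
    · simp [goA, skipWhileB, hc, ih]
    · simp [goA, skipWhileB, hc]

-- Phase 2 of A (start_sense_part set): skip non-dashes; at a dash append j+1 and enter phase 3.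
lemma phase2 (l : List Char) : ∀ (i : Nat) (acc : List Int),
    goA l i true false acc =
      (match skipWhileB (· != '-') l i with
       | (_, []) => acc
       | (j, _ :: rest) => goA rest (j + 1) false true (acc ++ [(j : Int) + 1])) := by
  induction l with
  | nil => intro i acc; simp [goA, skipWhileB]
  | cons c rest ih =>
    intro i acc
    by_cases hc : c = '-'
    · simp [goA, skipWhileB, hc]
    · simp [goA, skipWhileB, hc, ih]

-- Phase 1 of A (neither flag set, empty accumulator): skip leading dashes, then enter phase 2.
lemma phase1 (l : List Char) : ∀ (i : Nat),
    goA l i false false [] =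
      (match skipWhileB (· == '-') l i with
       | (_, []) => []
       | (j, _ :: rest) => goA rest (j + 1) true false []) := by
  induction l with
  | nil => intro i; simp [goA, skipWhileB]
  | cons c rest ih =>
    intro i
    by_cases hc : c = '-'
    · simp [goA, skipWhileB, hc, ih]
    · simp [goA, skipWhileB, hc]

lemma skipWhileB_head (p : Char → Bool) (l : List Char) : ∀ (i j : Nat) (c : Char) (rest : List Char),
    skipWhileB p l i = (j, c :: rest) → p c = false := by
  induction l with
  | nil => intro i j c rest h; simp [skipWhileB] at h
  | cons d tl ih =>
    intro i j c rest h
    by_cases hd : p d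
    · rw [skipWhileB, if_pos hd] at h; exact ih _ _ _ _ h
    · rw [skipWhileB, if_neg hd] at h
      obtain ⟨_, h2⟩ := Prod.mk.injEq .. ▸ h
      cases h2; simpa using hd

-- ===== VERDICT (by name: the statement is the Claim_ definition above) =====
theorem get_gap_indexes_spec : Claim_equal_get_gap_indexes := by
  intro seq _
  unfold Spec_get_gap_indexes get_gap_indexes get_gap_indexes_alt
  rw [phase1]
  rcases h1 : skipWhileB (· == '-') seq.toList 0 with ⟨j, r1⟩
  cases r1 with
  | nil => simp [h1, skipWhileB]
  | cons c rest =>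
    have hc : (c == '-') = false := skipWhileB_head (· == '-') seq.toList 0 j c rest h1
    simp only [h1]
    rw [phase2]
    have hstep : skipWhileB (· != '-') (c :: rest) j = skipWhileB (· != '-') rest (j + 1) := by
      have hne : (c != '-') = true := by simp [bne, hc]
      simp [skipWhileB, hne]
    rw [hstep]
    rcases h2 : skipWhileB (· != '-') rest (j + 1) with ⟨i2, r2⟩
    cases r2 with
    | nil => simp
    | cons c2 rest2 =>
      simp only
      rw [phase3]
      rcases h3 : skipWhileB (· == '-') rest2 (i2 + 1) with ⟨i3, r3⟩
      cases r3 <;> simp
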